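-- pv_equiv track=rewrite | github.com/blakinio/thesslagreen | custom_components/thessla_green_modbus/_coordinator_register_processing.py | create_consecutive_groups
-- ===== SOURCE A (Python) =====
-- def create_consecutive_groups(registers: dict[str, int]) -> list[tuple[int, int, dict[str, int]]]:
--     """Return grouped address ranges with key maps."""
--     ordered = sorted(registers.items(), key=lambda item: item[1])
--     if not ordered:
--         return []
--     groups: list[tuple[int, int, dict[str, int]]] = []
--     start = ordered[0][1]
--     prev = start
--     key_map: dict[str, int] = {ordered[0][0]: ordered[0][1]}
--     for key, addr in ordered[1:]:
--         if addr == prev + 1: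
--             key_map[key] = addr
--         else:
--             groups.append((start, prev - start + 1, dict(key_map)))
--             start = addr
--             key_map = {key: addr}
--         prev = addr
--     groups.append((start, prev - start + 1, dict(key_map)))
--     return groups
-- ===== SOURCE B (Python) =====
-- def create_consecutive_groups(registers: dict[str, int]) -> list[tuple[int, int, dict[str, int]]]:
--     """Return grouped address ranges with key maps (run-splitting two-pointer scan)."""
--     ordered = sorted(registers.items(), key=lambda item: item[1])
--     groups: list[tuple[int, int, dict[str, int]]] = []
--     i, n = 0, len(ordered)
--     while i < n:
--         j = i + 1
--         while j < n and ordered[j][1] == ordered[j - 1][1] + 1: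
--             j += 1
--         run = ordered[i:j]
--         groups.append((run[0][1], run[-1][1] - run[0][1] + 1, dict(run)))
--         i = j
--     return groups
-- ===== Notes on version B (the rewrite author's own statement) =====
-- stated objective: alternative
-- what changed: Replaces A's single accumulator pass that threads (start, prev, key_map) state and flushes groups at breaks with a two-pointer run-splitting scan: find each maximal consecutive run by advancing an index, then build the whole group (start, last-first+1, dict(run)) from the run slice at once.
import Mathlib
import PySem

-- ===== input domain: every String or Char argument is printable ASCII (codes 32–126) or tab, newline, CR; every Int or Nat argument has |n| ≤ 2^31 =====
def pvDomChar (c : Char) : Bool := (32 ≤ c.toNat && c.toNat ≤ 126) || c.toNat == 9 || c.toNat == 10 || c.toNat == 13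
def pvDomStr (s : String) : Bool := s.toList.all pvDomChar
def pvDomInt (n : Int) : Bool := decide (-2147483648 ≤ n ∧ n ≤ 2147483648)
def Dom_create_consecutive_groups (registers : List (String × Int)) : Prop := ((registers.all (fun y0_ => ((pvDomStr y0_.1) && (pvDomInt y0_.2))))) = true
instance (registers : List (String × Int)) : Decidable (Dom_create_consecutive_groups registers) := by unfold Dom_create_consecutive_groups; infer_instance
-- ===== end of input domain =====

-- B replaces A's single accumulator pass (threading start/prev/key_map and flushing at breaks)
-- with a two-pointer run-splitting scan that builds each group from its maximal consecutive run
-- at once (objective: alternative decomposition, same cost).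

-- ===== PORT A =====
-- the body of A's for-loop, acting on the state (groups, start, prev, key_map)
def pvStepA (s : List (Int × Int × (List (String × Int))) × Int × Int × PySem.Dict String Int)
    (p : String × Int) : List (Int × Int × (List (String × Int))) × Int × Int × PySem.Dict String Int :=
  if p.2 = s.2.2.1 + 1 then (s.1, s.2.1, p.2, s.2.2.2.insert p.1 p.2)
  else (s.1 ++ [(s.2.1, s.2.2.1 - s.2.1 + 1, s.2.2.2.items)], p.2, p.2, PySem.Dict.empty.insert p.1 p.2)

def create_consecutive_groups (registers : List (String × Int)) : List (Int × Int × (List (String × Int))) :=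
  let ordered := PySem.List.sorted registers (fun item => item.2) false
  match ordered with
  | [] => []
  | p :: rest =>
    let st := rest.foldl pvStepA ([], p.2, p.2, PySem.Dict.empty.insert p.1 p.2)
    st.1 ++ [(st.2.1, st.2.2.1 - st.2.1 + 1, st.2.2.2.items)]

-- ===== PORT B =====
-- the inner while loop of B: split off the maximal consecutive run after address `prev`
def pvChop (prev : Int) : List (String × Int) → List (String × Int) × List (String × Int)
  | [] => ([], [])
  | (k, a) :: t =>
    if a = prev + 1 then
      let r := pvChop a t
      ((k, a) :: r.1, r.2)
    else ([], (k, a) :: t)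

theorem pvChop_snd_length (prev : Int) (xs : List (String × Int)) :
    (pvChop prev xs).2.length ≤ xs.length := by
  induction xs generalizing prev with
  | nil => simp [pvChop]
  | cons p t ih =>
    obtain ⟨k, a⟩ := p
    simp only [pvChop]
    split
    · exact le_trans (ih a) (Nat.le_succ _)
    · simp

-- the outer while loop of B: one group per maximal run, then recurse on the remainder
mutual
def pvGroups (p : String × Int) (xs : List (String × Int)) : List (Int × Int × (List (String × Int))) :=
  let c := pvChop p.2 xs
  (p.2, (PySem.List.pyGetD (p :: c.1) (-1) p).2 - p.2 + 1, (PySem.Dict.ofList (p :: c.1)).items)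
    :: pvGroupsRest c.2
termination_by (xs.length, 1)
decreasing_by
  have h := pvChop_snd_length p.2 xs
  rcases Nat.lt_or_ge (pvChop p.2 xs).2.length xs.length with hl | hl
  · exact Prod.Lex.left _ _ hl
  · exact (Nat.le_antisymm h hl) ▸ Prod.Lex.right _ (by decide)

def pvGroupsRest : List (String × Int) → List (Int × Int × (List (String × Int)))
  | [] => []
  | q :: t => pvGroups q t
termination_by rest => (rest.length, 0)
decreasing_by
  exact Prod.Lex.left _ _ (Nat.lt_succ_self _)
end

def create_consecutive_groups_alt (registers : List (String × Int)) : List (Int × Int × (List (String × Int))) :=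
  match PySem.List.sorted registers (fun item => item.2) false with
  | [] => []
  | p :: rest => pvGroups p rest

-- ===== PRECONDITION & SPEC =====
def Spec_create_consecutive_groups (registers : List (String × Int)) (out : List (Int × Int × (List (String × Int)))) : Prop := out = create_consecutive_groups_alt registers
instance (registers : List (String × Int)) (out : List (Int × Int × (List (String × Int)))) : Decidable (Spec_create_consecutive_groups registers out) := by unfold Spec_create_consecutive_groups; infer_instance

-- ===== CLAIM (what is proved, stated in full; the proofs are below) =====
def Claim_equal_create_consecutive_groups : Prop := ∀ (registers : List (String × Int)), Dom_create_consecutive_groups registers → Spec_create_consecutive_groups registers (create_consecutive_groups registers)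

-- ===== LEMMAS AND PROOFS =====

-- proof-only intermediate: what B produces from the middle of a run, given the state A carries
def pvTail (start prev : Int) (km : PySem.Dict String Int) (xs : List (String × Int)) :
    List (Int × Int × (List (String × Int))) :=
  let c := pvChop prev xs
  (start, (PySem.List.pyGetD c.1 (-1) ("", prev)).2 - start + 1,
      (c.1.foldl (fun d p => d.insert p.1 p.2) km).items)
    :: pvGroupsRest c.2

theorem pyGetD_neg_one_cons_snd (p : String × Int) (r : List (String × Int)) (d : String × Int) :
    (PySem.List.pyGetD (p :: r) (-1) d).2 = (PySem.List.pyGetD r (-1) ("", p.2)).2 := by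
  cases r with
  | nil => simp [PySem.List.pyGetD, PySem.List.pyGet?, PySem.List.pyIdx?]
  | cons q t =>
    rw [PySem.List.pyGetD_neg_one (p :: q :: t) d (by simp),
        PySem.List.pyGetD_neg_one (q :: t) ("", p.2) (by simp),
        List.getLast_cons]

theorem ofList_cons_eq_foldl (p : String × Int) (r : List (String × Int)) :
    PySem.Dict.ofList (p :: r) = r.foldl (fun d q => d.insert q.1 q.2) (PySem.Dict.empty.insert p.1 p.2) := by
  simp [PySem.Dict.ofList, PySem.Dict.update]

theorem pvGroups_eq_tail (p : String × Int) (xs : List (String × Int)) :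
    pvGroups p xs = pvTail p.2 p.2 (PySem.Dict.empty.insert p.1 p.2) xs := by
  rw [pvGroups, pvTail]
  rw [pyGetD_neg_one_cons_snd, ofList_cons_eq_foldl]

theorem loopA_eq_tail (xs : List (String × Int)) :
    ∀ (groups : List (Int × Int × (List (String × Int)))) (start prev : Int) (km : PySem.Dict String Int),
      (let st := xs.foldl pvStepA (groups, start, prev, km)
       st.1 ++ [(st.2.1, st.2.2.1 - st.2.1 + 1, st.2.2.2.items)])
      = groups ++ pvTail start prev km xs := by
  induction xs with
  | nil =>
    intro groups start prev km
    rw [pvTail]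
    simp [pvChop, PySem.List.pyGetD, PySem.List.pyGet?, PySem.List.pyIdx?]
    rw [pvGroupsRest]
  | cons q t ih =>
    intro groups start prev km
    obtain ⟨k, a⟩ := q
    by_cases h : a = prev + 1
    · have hstep : pvStepA (groups, start, prev, km) (k, a) = (groups, start, a, km.insert k a) := by
        simp [pvStepA, h]
      have hc : pvChop prev ((k, a) :: t) = ((k, a) :: (pvChop a t).1, (pvChop a t).2) := by
        simp [pvChop, h]
      simp only [List.foldl_cons, hstep, ih]
      congr 1
      simp only [pvTail, hc]
      rw [pyGetD_neg_one_cons_snd]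
      rfl
    · have hstep : pvStepA (groups, start, prev, km) (k, a)
          = (groups ++ [(start, prev - start + 1, km.items)], a, a, PySem.Dict.empty.insert k a) := by
        simp [pvStepA, h]
      have hc : pvChop prev ((k, a) :: t) = ([], (k, a) :: t) := by
        simp [pvChop, h]
      simp only [List.foldl_cons, hstep, ih]
      conv_rhs => rw [pvTail]
      simp only [hc]
      rw [pvGroupsRest, pvGroups_eq_tail]
      simp [PySem.List.pyGetD, PySem.List.pyGet?, PySem.List.pyIdx?]

-- ===== VERDICT (by name: the statement is the Claim_ definition above) =====
theorem create_consecutive_groups_spec : Claim_equal_create_consecutive_groups := by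
  intro registers _
  unfold Spec_create_consecutive_groups create_consecutive_groups create_consecutive_groups_alt
  cases h : PySem.List.sorted registers (fun item => item.2) false with
  | nil => rfl
  | cons p rest =>
    simp only []
    rw [loopA_eq_tail rest [] p.2 p.2 (PySem.Dict.empty.insert p.1 p.2)]
    rw [← pvGroups_eq_tail]
    rfl
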